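-- pv_equiv track=rewrite | github.com/SyngyeonTak/SBRs | experiments/noise_aware/get_statistics.py | calculate_session_groups
-- ===== SOURCE A (Python) =====
-- def calculate_session_groups(data):
--     # Count the number of items in each session
--     session_lengths = [len(sublist) for sublist in data]
--
--     # Initialize counters for the groups
--     group1_count = 0
--     group2_count = 0
--     group3_count = 0
--
--     # Count sessions in each group
--     for length in session_lengths:
--         if length > 8:
--             group1_count += 1
--         if length > 5 and length <= 8:
--             group2_count += 1
--         elif length < 5:
--             group3_count += 1
--
--     return group1_count, group2_count, group3_count, session_lengths
-- ===== SOURCE B (Python) =====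
-- def calculate_session_groups(data):
--     session_lengths = [len(sublist) for sublist in data]
--     counts = {}
--     for l in session_lengths:
--         counts[l] = counts.get(l, 0) + 1
--     group1_count = sum(c for l, c in counts.items() if l > 8)
--     group2_count = sum(c for l, c in counts.items() if 5 < l <= 8)
--     group3_count = sum(c for l, c in counts.items() if l < 5)
--     return group1_count, group2_count, group3_count, session_lengths
-- ===== Notes on version B (the rewrite author's own statement) =====
-- stated objective: alternative
-- what changed: B builds a frequency table (dict) of session lengths in one pass and computes each group by summing multiplicities over the distinct lengths, instead of A's per-session if/elif counting loop.
import Mathlib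
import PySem

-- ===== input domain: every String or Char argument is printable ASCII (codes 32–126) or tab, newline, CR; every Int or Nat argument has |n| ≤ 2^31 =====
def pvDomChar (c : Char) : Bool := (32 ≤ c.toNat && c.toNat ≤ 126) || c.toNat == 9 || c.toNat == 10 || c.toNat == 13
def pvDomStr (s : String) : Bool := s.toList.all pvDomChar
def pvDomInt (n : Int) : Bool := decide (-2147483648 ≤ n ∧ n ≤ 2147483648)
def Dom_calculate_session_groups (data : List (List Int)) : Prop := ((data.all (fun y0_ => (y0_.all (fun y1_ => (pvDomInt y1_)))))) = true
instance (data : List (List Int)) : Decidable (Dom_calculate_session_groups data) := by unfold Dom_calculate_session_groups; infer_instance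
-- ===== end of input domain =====

-- ===== PORT A =====
-- A's per-session counting loop: if / if-elif on each length, three counters.
def calculate_session_groups (data : List (List Int)) : Int × Int × Int × List Int :=
  let session_lengths := data.map (fun sublist => (sublist.length : Int))
  let st := session_lengths.foldl (fun (st : Int × Int × Int) length =>
    let st1 := if length > 8 then (st.1 + 1, st.2.1, st.2.2) else st
    if length > 5 ∧ length ≤ 8 then (st1.1, st1.2.1 + 1, st1.2.2)
    else if length < 5 then (st1.1, st1.2.1, st1.2.2 + 1)
    else st1) (0, 0, 0)
  (st.1, st.2.1, st.2.2, session_lengths)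

-- ===== PORT B =====
-- B: one histogram pass (counts[l] = counts.get(l, 0) + 1), then sums of multiplicities over distinct lengths.
def calculate_session_groups_alt (data : List (List Int)) : Int × Int × Int × List Int :=
  let session_lengths := data.map (fun sublist => (sublist.length : Int))
  let counts := session_lengths.foldl (fun (d : PySem.Dict Int Int) l => d.insert l (d.getD l 0 + 1)) PySem.Dict.empty
  let group1_count := ((counts.items.filter (fun p => p.1 > 8)).map (·.2)).sum
  let group2_count := ((counts.items.filter (fun p => 5 < p.1 ∧ p.1 ≤ 8)).map (·.2)).sum
  let group3_count := ((counts.items.filter (fun p => p.1 < 5)).map (·.2)).sum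
  (group1_count, group2_count, group3_count, session_lengths)

-- ===== PRECONDITION & SPEC =====
def Spec_calculate_session_groups (data : List (List Int)) (out : Int × Int × Int × List Int) : Prop := out = calculate_session_groups_alt data
instance (data : List (List Int)) (out : Int × Int × Int × List Int) : Decidable (Spec_calculate_session_groups data out) := by unfold Spec_calculate_session_groups; infer_instance

-- ===== CLAIM (what is proved, stated in full; the proofs are below) =====
def Claim_equal_calculate_session_groups : Prop := ∀ (data : List (List Int)), Dom_calculate_session_groups data → Spec_calculate_session_groups data (calculate_session_groups data)

-- ===== LEMMAS AND PROOFS =====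

-- A's loop adds, to each accumulator, the number of lengths satisfying its condition.
lemma loopA_eq (ls : List Int) (a b c : Int) :
    ls.foldl (fun (st : Int × Int × Int) length =>
      let st1 := if length > 8 then (st.1 + 1, st.2.1, st.2.2) else st
      if length > 5 ∧ length ≤ 8 then (st1.1, st1.2.1 + 1, st1.2.2)
      else if length < 5 then (st1.1, st1.2.1, st1.2.2 + 1)
      else st1) (a, b, c)
    = (a + ls.countP (fun l => decide (l > 8)),
       b + ls.countP (fun l => decide (l > 5 ∧ l ≤ 8)),
       c + ls.countP (fun l => decide (l < 5))) := by
  induction ls generalizing a b c with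
  | nil => simp
  | cons x ls ih =>
    simp only [List.foldl_cons, List.countP_cons]
    by_cases h8 : x > 8 <;> by_cases h58 : x > 5 ∧ x ≤ 8 <;> by_cases h5 : x < 5 <;>
      simp only [h8, h58, h5, decide_true, decide_false, if_pos, if_neg, not_false_eq_true] <;>
      first
      | (exfalso; omega)
      | (rw [ih]; simp [Prod.ext_iff]; try omega)

-- A 0/1 indicator sum over a list is the count of x in it (Int-valued).
lemma sum_ite_eq_count (x : Int) (t : List Int) :
    (t.map (fun k => if k = x then (1 : Int) else 0)).sum = (t.count x : Int) := by
  induction t with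
  | nil => simp
  | cons y t ih =>
    by_cases h : y = x <;> simp [h, ih] <;> omega

-- Summing ls.count over a Nodup list of keys covering ls, restricted by p, counts ls.countP p.
lemma sum_count_filter (p : Int → Bool) (s : List Int) (hs : s.Nodup) :
    ∀ (ls : List Int), (∀ x ∈ ls, x ∈ s) →
      ((s.filter p).map (fun k => (ls.count k : Int))).sum = (ls.countP p : Int) := by
  intro ls
  induction ls with
  | nil => intro _; simp
  | cons x ls ih =>
    intro hmem
    have hx : x ∈ s := hmem x (by simp)
    have hrest : ∀ y ∈ ls, y ∈ s := fun y hy => hmem y (by simp [hy])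
    have hcnt : ∀ k, ((x :: ls).count k : Int) = (ls.count k : Int) + (if k = x then 1 else 0) := by
      intro k
      by_cases hk : k = x <;> simp [List.count_cons, hk] <;> omega
    have hsum1 : ((s.filter p).map (fun k => ((x :: ls).count k : Int))).sum
        = ((s.filter p).map (fun k => (ls.count k : Int))).sum
          + ((s.filter p).map (fun k => if k = x then (1 : Int) else 0)).sum := by
      rw [← List.sum_map_add]
      exact congrArg List.sum (List.map_congr_left (fun k _ => hcnt k))
    have hone : ((s.filter p).map (fun k => if k = x then (1 : Int) else 0)).sum
        = if p x then 1 else 0 := by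
      rw [sum_ite_eq_count]
      have hnd : (s.filter p).Nodup := hs.filter p
      by_cases hpx : p x
      · have hxin : x ∈ s.filter p := List.mem_filter.mpr ⟨hx, hpx⟩
        simp [List.count_eq_one_of_mem hnd hxin, hpx]
      · have hxout : x ∉ s.filter p := fun hmem' => hpx (List.of_mem_filter hmem')
        simp [List.count_eq_zero_of_not_mem hxout, hpx]
    rw [hsum1, ih hrest, hone, List.countP_cons]
    by_cases hpx : p x <;> simp [hpx]

-- B's per-group sum over the counter's items equals ls.countP p.
lemma groupB_eq (p : Int → Bool) (ls : List Int) :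
    ((((PySem.Dict.counter ls).items).filter (fun q : Int × Int => p q.1)).map (·.2)).sum
      = (ls.countP p : Int) := by
  rw [PySem.Dict.items_counter]
  rw [List.filter_map, List.map_map]
  have : (fun q : Int × Int => p q.1) ∘ (fun k => (k, (ls.count k : Int))) = p := rfl
  rw [this]
  exact sum_count_filter p (PySem.Set.ofList ls) (PySem.Set.nodup_ofList ls) ls
    (fun x hx => (PySem.Set.mem_ofList ls x).mpr hx)

-- The three instances of groupB_eq, with the predicates written as in the ports.
lemma groupB1 (ls : List Int) :
    (((PySem.Dict.counter ls).items.filter (fun p : Int × Int => p.1 > 8)).map (·.2)).sum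
      = (ls.countP (fun l => decide (l > 8)) : Int) :=
  groupB_eq (fun l => decide (l > 8)) ls

lemma groupB2 (ls : List Int) :
    (((PySem.Dict.counter ls).items.filter (fun p : Int × Int => 5 < p.1 ∧ p.1 ≤ 8)).map (·.2)).sum
      = (ls.countP (fun l => decide (l > 5 ∧ l ≤ 8)) : Int) :=
  groupB_eq (fun l => decide (l > 5 ∧ l ≤ 8)) ls

lemma groupB3 (ls : List Int) :
    (((PySem.Dict.counter ls).items.filter (fun p : Int × Int => p.1 < 5)).map (·.2)).sum
      = (ls.countP (fun l => decide (l < 5)) : Int) :=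
  groupB_eq (fun l => decide (l < 5)) ls

-- ===== VERDICT (by name: the statement is the Claim_ definition above) =====
theorem calculate_session_groups_spec : Claim_equal_calculate_session_groups := by
  intro data _
  unfold Spec_calculate_session_groups
  show calculate_session_groups data = calculate_session_groups_alt data
  simp only [calculate_session_groups, calculate_session_groups_alt]
  rw [PySem.Dict.foldl_insert_getD_add_one_eq_counter]
  rw [loopA_eq, groupB1, groupB2, groupB3]
  simp
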